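-- pv_equiv track=rewrite | github.com/ucsd-ets/dsc10-sp19 | Homeworks/hw05/grade.py | get_cells_between
-- ===== SOURCE A (Python) =====
-- def get_cells_between(cells, start, end):
--     """
--     Returns a list of cells between the cell that contains the string start and
--     the cell that contains the string end. The cells parameter refers to the
--     cells of a notebook. Given a notebook nb, you can access its cells with
--     `nb.cells`.
--
--     For example, if you want to get the cells between a cell that contains the
--     word "Question 1" and a cell that contains "Question 3" (i.e. you want to
--     get the cells between Question 1 and Question 3), you would use:
--     get_cells_between(cells, 'Question 1', 'Question 3')
--     """
--     start_index = None
--     end_index = None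
--
--     for index, cell in enumerate(cells):
--         if start_index is None and start in cell['source']:
--             start_index = index
--         elif start_index is not None and end in cell['source']:
--             end_index = index
--
--             break
--
--     if start_index and end_index:
--         return cells[start_index:end_index]
--
--     return []
-- ===== SOURCE B (Python) =====
-- def _take_until(cells, end):
--     """Cells before the first cell whose source contains end, or None if none does."""
--     if not cells:
--         return None
--     if end in cells[0]['source']:
--         return []
--     rest = _take_until(cells[1:], end)
--     return None if rest is None else [cells[0]] + rest
--
--
-- def get_cells_between(cells, start, end):
--     if not cells:
--         return []
--     if start in cells[0]['source']:
--         body = _take_until(cells[1:], end)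
--         return [] if body is None else [cells[0]] + body
--     return get_cells_between(cells[1:], start, end)
-- ===== Notes on version B (the rewrite author's own statement) =====
-- stated objective: alternative
-- what changed: Replaces A's indexed stateful scan (enumerate, two mutable indices, break, then a slice) with a structural recursion that never computes an index: it skips cells until the start cell and then builds the output cell-by-cell up to the end cell.
-- intended difference: When the start marker occurs in the very first cell and some later cell contains the end marker, A's truthiness guard 'if start_index and end_index' treats index 0 as falsy and returns [], while B returns the intended cells[0:end_index]; B's value is what the docstring describes. — e.g. on get_cells_between([[("source", "a")], [("source", "b")]], "a", "b"): A returns [], B returns [[("source", "a")]]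
-- outside the precondition, e.g. on get_cells_between([{'source': 'a'}, {'source': 'b'}, {}], 'a', 'b'): A returns [], B returns [{'source': 'a'}]
import Mathlib
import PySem

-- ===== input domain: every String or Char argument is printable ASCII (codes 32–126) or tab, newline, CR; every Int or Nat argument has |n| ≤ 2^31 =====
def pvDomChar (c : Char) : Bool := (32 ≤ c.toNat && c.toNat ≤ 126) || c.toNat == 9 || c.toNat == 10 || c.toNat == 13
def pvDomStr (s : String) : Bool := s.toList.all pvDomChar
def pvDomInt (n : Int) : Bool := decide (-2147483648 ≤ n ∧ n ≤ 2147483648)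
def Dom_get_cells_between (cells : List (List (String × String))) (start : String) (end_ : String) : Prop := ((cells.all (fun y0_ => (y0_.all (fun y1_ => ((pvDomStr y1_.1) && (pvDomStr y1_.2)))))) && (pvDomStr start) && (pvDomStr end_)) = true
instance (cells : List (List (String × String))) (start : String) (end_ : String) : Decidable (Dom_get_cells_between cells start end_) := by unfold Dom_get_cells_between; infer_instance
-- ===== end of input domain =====

-- B replaces A's indexed stateful scan (enumerate, two mutable indices, break, slice) with a
-- structural recursion that builds the output cell-by-cell; on inputs where the start marker is in
-- the FIRST cell and an end marker follows, A's truthiness guard returns [] and B returns the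
-- intended cells (stated as D_ below).


-- cell['source'] : first-match association-list lookup ("" default is never reached inside Pre_)
def pvSrc (c : List (String × String)) : String :=
  ((c.find? (fun p => p.1 == "source")).map Prod.snd).getD ""

-- Python truthiness of start_index/end_index (None and 0 are falsy)
def pvTruthy : Option Nat → Bool
  | none => false
  | some n => n != 0

-- ===== PORT A =====
-- A's for-loop: state (index, start_index); returns (start_index, end_index) at break / loop end
def pvA_loop (P Q : List (String × String) → Bool) :
    List (List (String × String)) → Nat → Option Nat → Option Nat × Option Nat
  | [], _, si => (si, none)
  | c :: rest, idx, si =>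
    if si.isNone && P c then pvA_loop P Q rest (idx + 1) (some idx)
    else if !si.isNone && Q c then (si, some idx)
    else pvA_loop P Q rest (idx + 1) si

def get_cells_between (cells : List (List (String × String))) (start : String) (end_ : String) : List (List (String × String)) :=
  let P := fun (c : List (String × String)) => PySem.Str.isIn start (pvSrc c)
  let Q := fun (c : List (String × String)) => PySem.Str.isIn end_ (pvSrc c)
  let r := pvA_loop P Q cells 0 none
  if pvTruthy r.1 && pvTruthy r.2 then
    PySem.List.slice cells (some ((r.1.getD 0 : Nat) : Int)) (some ((r.2.getD 0 : Nat) : Int))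
  else []

-- ===== PORT B =====
-- _take_until: cells before the first cell whose source contains end, or none if no cell does
def pvTakeUntil (Q : List (String × String) → Bool) :
    List (List (String × String)) → Option (List (List (String × String)))
  | [] => none
  | c :: rest => if Q c then some [] else (pvTakeUntil Q rest).map (fun r => c :: r)

def get_cells_between_alt (cells : List (List (String × String))) (start : String) (end_ : String) : List (List (String × String)) :=
  match cells with
  | [] => []
  | c :: rest =>
    if PySem.Str.isIn start (pvSrc c) then
      match pvTakeUntil (fun d => PySem.Str.isIn end_ (pvSrc d)) rest with
      | none => []
      | some body => c :: body
    else get_cells_between_alt rest start end_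

-- ===== PRECONDITION & SPEC =====
-- Pre_ excludes cells lists containing a cell without a 'source' key: on those A raises KeyError
-- (and B raises identically) except when such a cell lies past the scanned region, where both
-- still return the same value (Pre_ is slightly narrower than A's exact raise set there).
def Pre_get_cells_between (cells : List (List (String × String))) (start : String) (end_ : String) : Prop :=
  ∀ c ∈ cells, "source" ∈ c.map Prod.fst
instance (cells : List (List (String × String))) (start : String) (end_ : String) : Decidable (Pre_get_cells_between cells start end_) := by unfold Pre_get_cells_between; infer_instance

def pvWitness_get_cells_between : (List (List (String × String))) × String × String :=
  ([[("source", "q1")], [("source", "body")], [("source", "q2")]], "q1", "q2")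

-- When the start marker occurs in the very first cell and some later cell contains the end marker,
-- A's guard 'if start_index and end_index' treats index 0 as falsy and returns [], while B returns
-- the intended cells[0:end_index]; B's value is what the docstring describes.
def D_get_cells_between (cells : List (List (String × String))) (start : String) (end_ : String) : Prop :=
  cells ≠ [] ∧ PySem.Str.isIn start (pvSrc (cells.headD [])) = true ∧
    ∃ d ∈ cells.tail, PySem.Str.isIn end_ (pvSrc d) = true
instance (cells : List (List (String × String))) (start : String) (end_ : String) : Decidable (D_get_cells_between cells start end_) := by unfold D_get_cells_between; infer_instance

def Spec_get_cells_between (cells : List (List (String × String))) (start : String) (end_ : String) (out : List (List (String × String))) : Prop := ¬ D_get_cells_between cells start end_ → out = get_cells_between_alt cells start end_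
instance (cells : List (List (String × String))) (start : String) (end_ : String) (out : List (List (String × String))) : Decidable (Spec_get_cells_between cells start end_ out) := by unfold Spec_get_cells_between; infer_instance

def pvDiffWitness_get_cells_between : (List (List (String × String))) × String × String :=
  ([[("source", "a")], [("source", "b")]], "a", "b")
def pvDiffWitnessOut_get_cells_between : (List (List (String × String))) × (List (List (String × String))) :=
  ([], [[("source", "a")]])

-- ===== CLAIM (what is proved, stated in full; the proofs are below) =====
def Claim_unchanged_get_cells_between : Prop := ∀ (cells : List (List (String × String))) (start : String) (end_ : String), Dom_get_cells_between cells start end_ → Pre_get_cells_between cells start end_ → Spec_get_cells_between cells start end_ (get_cells_between cells start end_)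
def Claim_changed_get_cells_between : Prop := Dom_get_cells_between (pvDiffWitness_get_cells_between.1) (pvDiffWitness_get_cells_between.2.1) (pvDiffWitness_get_cells_between.2.2) ∧ Pre_get_cells_between (pvDiffWitness_get_cells_between.1) (pvDiffWitness_get_cells_between.2.1) (pvDiffWitness_get_cells_between.2.2) ∧ D_get_cells_between (pvDiffWitness_get_cells_between.1) (pvDiffWitness_get_cells_between.2.1) (pvDiffWitness_get_cells_between.2.2) ∧ get_cells_between (pvDiffWitness_get_cells_between.1) (pvDiffWitness_get_cells_between.2.1) (pvDiffWitness_get_cells_between.2.2) = pvDiffWitnessOut_get_cells_between.1 ∧ get_cells_between_alt (pvDiffWitness_get_cells_between.1) (pvDiffWitness_get_cells_between.2.1) (pvDiffWitness_get_cells_between.2.2) = pvDiffWitnessOut_get_cells_between.2 ∧ pvDiffWitnessOut_get_cells_between.1 ≠ pvDiffWitnessOut_get_cells_between.2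
def Claim_exact_get_cells_between : Prop := ∀ (cells : List (List (String × String))) (start : String) (end_ : String), Dom_get_cells_between cells start end_ → Pre_get_cells_between cells start end_ → D_get_cells_between cells start end_ → get_cells_between cells start end_ ≠ get_cells_between_alt cells start end_

-- ===== LEMMAS AND PROOFS =====

-- proof-only helper: position of the first match at or after base index k
def pvFindFrom (P : List (String × String) → Bool) :
    List (List (String × String)) → Nat → Option Nat
  | [], _ => none
  | c :: rest, k => if P c then some k else pvFindFrom P rest (k + 1)

-- proof-only generic clone of B's recursion (abstracts the two membership predicates)
def pvAltGen (P Q : List (String × String) → Bool) :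
    List (List (String × String)) → List (List (String × String))
  | [] => []
  | c :: rest =>
    if P c then
      match pvTakeUntil Q rest with
      | none => []
      | some body => c :: body
    else pvAltGen P Q rest

theorem pvFindFrom_ge (P : List (String × String) → Bool)
    (l : List (List (String × String))) (k j : Nat)
    (h : pvFindFrom P l k = some j) : k ≤ j := by
  induction l generalizing k with
  | nil => simp [pvFindFrom] at h
  | cons c rest ih =>
    simp only [pvFindFrom] at h
    split at h
    · injection h with h; omega
    · have := ih (k + 1) h; omega

theorem pvFindFrom_shift (P : List (String × String) → Bool)
    (l : List (List (String × String))) (k : Nat) :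
    pvFindFrom P l (k + 1) = (pvFindFrom P l k).map (· + 1) := by
  induction l generalizing k with
  | nil => simp [pvFindFrom]
  | cons c rest ih =>
    simp only [pvFindFrom]
    by_cases hp : P c = true <;> simp [hp, ih]

theorem pvFindFrom_mem (Q : List (String × String) → Bool)
    (l : List (List (String × String))) (k m : Nat)
    (h : pvFindFrom Q l k = some m) : ∃ d ∈ l, Q d = true := by
  induction l generalizing k with
  | nil => simp [pvFindFrom] at h
  | cons c rest ih =>
    simp only [pvFindFrom] at h
    by_cases hq : Q c = true
    · exact ⟨c, by simp, hq⟩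
    · simp only [hq, if_false, Bool.false_eq_true] at h
      rcases ih (k + 1) h with ⟨d, hd, hQd⟩
      exact ⟨d, by simp [hd], hQd⟩

theorem pvFindFrom_of_exists (Q : List (String × String) → Bool)
    (l : List (List (String × String))) (k : Nat)
    (h : ∃ d ∈ l, Q d = true) : ∃ m, pvFindFrom Q l k = some m := by
  induction l generalizing k with
  | nil => simp at h
  | cons c rest ih =>
    simp only [pvFindFrom]
    by_cases hq : Q c = true
    · exact ⟨k, by simp [hq]⟩
    · simp only [hq, if_false, Bool.false_eq_true]
      rcases h with ⟨d, hd, hQd⟩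
      rcases List.mem_cons.1 hd with rfl | hd'
      · exact absurd hQd hq
      · exact ih (k + 1) ⟨d, hd', hQd⟩

theorem pvTakeUntil_none (Q : List (String × String) → Bool)
    (l : List (List (String × String))) (k : Nat)
    (h : pvFindFrom Q l k = none) : pvTakeUntil Q l = none := by
  induction l generalizing k with
  | nil => simp [pvTakeUntil]
  | cons c rest ih =>
    simp only [pvFindFrom] at h
    split at h
    · exact absurd h (by simp)
    · simp only [pvTakeUntil]
      rename_i hq
      simp [hq, ih (k + 1) h]

theorem pvTakeUntil_some (Q : List (String × String) → Bool)
    (l : List (List (String × String))) (k m : Nat)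
    (h : pvFindFrom Q l k = some m) : pvTakeUntil Q l = some (l.take (m - k)) := by
  induction l generalizing k m with
  | nil => simp [pvFindFrom] at h
  | cons c rest ih =>
    simp only [pvFindFrom] at h
    by_cases hq : Q c = true
    · simp only [hq, if_true] at h
      injection h with h
      simp [pvTakeUntil, hq, ← h]
    · simp only [hq, if_false, Bool.false_eq_true] at h
      have hk := pvFindFrom_ge Q rest (k + 1) m h
      have hsub : m - k = (m - (k + 1)) + 1 := by omega
      simp [pvTakeUntil, hq, ih (k + 1) m h, hsub]

-- characterisation of A's loop
theorem pvA_loop_some (P Q : List (String × String) → Bool)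
    (l : List (List (String × String))) (k i : Nat) :
    pvA_loop P Q l k (some i) = (some i, pvFindFrom Q l k) := by
  induction l generalizing k with
  | nil => simp [pvA_loop, pvFindFrom]
  | cons c rest ih =>
    simp only [pvA_loop, pvFindFrom, Option.isNone_some, Bool.false_and, Bool.not_false,
      Bool.true_and]
    by_cases hq : Q c = true <;> simp [hq, ih]

theorem pvA_loop_none (P Q : List (String × String) → Bool)
    (l : List (List (String × String))) (k : Nat) :
    pvA_loop P Q l k none =
      (pvFindFrom P l k,
       match pvFindFrom P l k with
       | none => none
       | some j => pvFindFrom Q (l.drop (j + 1 - k)) (j + 1)) := by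
  induction l generalizing k with
  | nil => simp [pvA_loop, pvFindFrom]
  | cons c rest ih =>
    simp only [pvA_loop, pvFindFrom, Option.isNone_none, Bool.true_and, Bool.not_true,
      Bool.false_and]
    by_cases hp : P c = true <;> simp only [hp, if_true, if_false, Bool.false_eq_true]
    · rw [pvA_loop_some]
      simp
    · rw [ih (k + 1)]
      cases hf : pvFindFrom P rest (k + 1) with
      | none => rfl
      | some j =>
        have hk : k + 1 ≤ j := pvFindFrom_ge P rest (k + 1) j hf
        have hdrop : (c :: rest).drop (j + 1 - k) = rest.drop (j + 1 - (k + 1)) := by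
          have : j + 1 - k = (j + 1 - (k + 1)) + 1 := by omega
          rw [this, List.drop_succ_cons]
        simp [hdrop]

-- reference form both ports are reduced to
def pvRef (P Q : List (String × String) → Bool)
    (cells : List (List (String × String))) : List (List (String × String)) :=
  match pvFindFrom P cells 0 with
  | none => []
  | some j =>
    match pvFindFrom Q (cells.drop (j + 1)) (j + 1) with
    | none => []
    | some m => PySem.List.slice cells (some (j : Int)) (some (m : Int))

theorem alt_eq_gen (start end_ : String) (cells : List (List (String × String))) :
    get_cells_between_alt cells start end_ =
      pvAltGen (fun c => PySem.Str.isIn start (pvSrc c))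
               (fun d => PySem.Str.isIn end_ (pvSrc d)) cells := by
  induction cells with
  | nil => rfl
  | cons c rest ih =>
    show (if PySem.Str.isIn start (pvSrc c) then _ else get_cells_between_alt rest start end_) = _
    rw [pvAltGen, ih]

theorem gen_eq_ref (P Q : List (String × String) → Bool)
    (cells : List (List (String × String))) :
    pvAltGen P Q cells = pvRef P Q cells := by
  induction cells with
  | nil => rfl
  | cons c rest ih =>
    by_cases hp : P c = true
    · simp only [pvAltGen, pvRef, pvFindFrom, hp, if_true, List.drop_succ_cons, List.drop_zero]
      cases hq : pvFindFrom Q rest 1 with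
      | none => rw [pvTakeUntil_none Q rest 1 hq]
      | some m =>
        have hm : 1 ≤ m := pvFindFrom_ge Q rest 1 m hq
        rw [pvTakeUntil_some Q rest 1 m hq]
        simp only [PySem.List.slice_natCast, List.drop_zero, Nat.sub_zero]
        have hms : m = (m - 1) + 1 := by omega
        rw [hms, List.take_succ_cons]
        simp
    · simp only [pvAltGen, pvRef, pvFindFrom, hp, if_false, Bool.false_eq_true]
      rw [ih]
      simp only [pvRef]
      rw [pvFindFrom_shift P rest 0]
      cases hf : pvFindFrom P rest 0 with
      | none => simp
      | some j =>
        simp only [hf, Option.map_some]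
        rw [List.drop_succ_cons, pvFindFrom_shift Q (rest.drop (j + 1)) (j + 1)]
        cases hq : pvFindFrom Q (rest.drop (j + 1)) (j + 1) with
        | none => simp
        | some m =>
          have hm : j + 1 ≤ m := pvFindFrom_ge Q _ _ _ hq
          simp only [hq, Option.map_some, PySem.List.slice_natCast, List.drop_succ_cons]
          congr 1
          omega

theorem a_eq_ref_of_notD (start end_ : String) (cells : List (List (String × String)))
    (hnD : ¬ D_get_cells_between cells start end_) :
    get_cells_between cells start end_ =
      pvRef (fun c => PySem.Str.isIn start (pvSrc c))
            (fun d => PySem.Str.isIn end_ (pvSrc d)) cells := by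
  unfold get_cells_between pvRef
  simp only [pvA_loop_none, PySem.Str.isIn]
  cases hf : pvFindFrom (fun c => PySem.Chars.isIn start.toList (pvSrc c).toList) cells 0 with
  | none => simp [pvTruthy]
  | some j =>
    simp only [Nat.sub_zero]
    cases hq : pvFindFrom (fun d => PySem.Chars.isIn end_.toList (pvSrc d).toList) (cells.drop (j + 1)) (j + 1) with
    | none => simp [pvTruthy]
    | some m =>
      have hm : j + 1 ≤ m := pvFindFrom_ge _ _ _ _ hq
      by_cases hj : j = 0
      · exfalso
        apply hnD
        subst hj
        cases cells with
        | nil => simp [pvFindFrom] at hf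
        | cons c rest =>
          simp only [pvFindFrom] at hf
          by_cases hp : PySem.Chars.isIn start.toList (pvSrc c).toList = true
          · refine ⟨by simp, by simpa [PySem.Str.isIn] using hp, ?_⟩
            simp only [List.drop_succ_cons, List.drop_zero] at hq
            simpa [PySem.Str.isIn] using pvFindFrom_mem _ rest 1 m hq
          · simp only [hp, if_false, Bool.false_eq_true] at hf
            have := pvFindFrom_ge _ rest 1 0 hf
            omega
      · have hmne : (m != 0) = true := by simp; omega
        have hjne : (j != 0) = true := by simp; omega
        simp [pvTruthy, hjne, hmne]

-- inside D_: A returns [] while B returns a list starting with the first cell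
theorem a_eq_nil_of_D (start end_ : String) (cells : List (List (String × String)))
    (hD : D_get_cells_between cells start end_) :
    get_cells_between cells start end_ = [] := by
  rcases hD with ⟨hne, hhd, hex⟩
  cases cells with
  | nil => exact absurd rfl hne
  | cons c rest =>
    simp only [List.headD_cons] at hhd
    simp only [List.tail_cons] at hex
    unfold get_cells_between
    simp only [pvA_loop_none, PySem.Str.isIn]
    simp only [PySem.Str.isIn] at hhd hex
    have hf : pvFindFrom (fun c => PySem.Chars.isIn start.toList (pvSrc c).toList) (c :: rest) 0 = some 0 := by
      simp [pvFindFrom, hhd]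
    rcases pvFindFrom_of_exists (fun d => PySem.Chars.isIn end_.toList (pvSrc d).toList) rest 1 hex with ⟨m, hm⟩
    simp [hf, List.drop_succ_cons, List.drop_zero, hm, pvTruthy]

theorem alt_ne_nil_of_D (start end_ : String) (cells : List (List (String × String)))
    (hD : D_get_cells_between cells start end_) :
    get_cells_between_alt cells start end_ ≠ [] := by
  rcases hD with ⟨hne, hhd, hex⟩
  cases cells with
  | nil => exact absurd rfl hne
  | cons c rest =>
    simp only [List.headD_cons] at hhd
    simp only [List.tail_cons] at hex
    rw [alt_eq_gen, gen_eq_ref]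
    simp only [pvRef, pvFindFrom, hhd, if_true, List.drop_succ_cons, List.drop_zero]
    rcases pvFindFrom_of_exists (fun d => PySem.Str.isIn end_ (pvSrc d)) rest 1 hex with ⟨m, hm⟩
    have h1 : 1 ≤ m := pvFindFrom_ge _ rest 1 m hm
    rw [hm]
    simp only [PySem.List.slice_natCast, List.drop_zero, Nat.sub_zero]
    intro h
    have := congrArg List.length h
    simp at this
    omega

-- ===== VERDICT (by name: the statements are the Claim_ definitions above) =====
theorem get_cells_between_spec : Claim_unchanged_get_cells_between := by
  intro cells start end_ _ _ hnD
  rw [a_eq_ref_of_notD start end_ cells hnD, alt_eq_gen, gen_eq_ref]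

theorem get_cells_between_changed : Claim_changed_get_cells_between := by
  unfold Claim_changed_get_cells_between; decide

theorem get_cells_between_tight : Claim_exact_get_cells_between := by
  intro cells start end_ _ _ hD
  rw [a_eq_nil_of_D start end_ cells hD]
  exact fun h => alt_ne_nil_of_D start end_ cells hD h.symm
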